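-- pv_equiv track=rewrite | github.com/bhardwajRahul/ClawTeam | clawteam/spawn/command_validation.py | _docker_has_env
-- ===== SOURCE A (Python) =====
-- def _docker_has_env(prefix: list[str], key: str) -> bool:
--     i = 0
--     while i < len(prefix):
--         token = prefix[i]
--         if token in {"-e", "--env"} and i + 1 < len(prefix):
--             if _env_key_matches(prefix[i + 1], key):
--                 return True
--             i += 2
--             continue
--         if token.startswith("--env=") and _env_key_matches(token.split("=", 1)[1], key):
--             return True
--         i += 1
--     return False
--
-- def _env_key_matches(spec: str, key: str) -> bool:
--     return spec == key or spec.startswith(f"{key}=")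
-- ===== SOURCE B (Python) =====
-- def _docker_has_env(prefix: list[str], key: str) -> bool:
--     # Phase 1: run-length prefix scan. runs[i] = length of the maximal block of
--     # consecutive "-e"/"--env" tokens ending just before position i.  Within such
--     # a block, the flags at even offsets are active and each consumes the next
--     # token, so token i is a consumed value-spec exactly when runs[i] is odd.
--     runs, r = [], 0
--     for t in prefix:
--         runs.append(r)
--         r = r + 1 if t in ("-e", "--env") else 0
--
--     # Phase 2: classify every position independently from its run parity.
--     def spec(t, r):
--         if r % 2:                      # consumed as the value of an active flag
--             return t
--         if t.startswith("--env="):     # inline --env=K[=V]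
--             return t.split("=", 1)[1]
--         return None                    # flag itself / ordinary token
--
--     return any(s == key or s.startswith(key + "=")
--                for s in (spec(t, r) for t, r in zip(prefix, runs))
--                if s is not None)
-- ===== Notes on version B (the rewrite author's own statement) =====
-- stated objective: alternative
-- what changed: Replaces A's sequential consume-and-skip index loop by a two-phase positional algorithm: a run-length prefix scan over consecutive -e/--env blocks, then each token is classified independently as a value-spec iff the flag run ending just before it has odd length (no lookahead, no index skipping), with an any() over the classified specs.
import Mathlib
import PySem

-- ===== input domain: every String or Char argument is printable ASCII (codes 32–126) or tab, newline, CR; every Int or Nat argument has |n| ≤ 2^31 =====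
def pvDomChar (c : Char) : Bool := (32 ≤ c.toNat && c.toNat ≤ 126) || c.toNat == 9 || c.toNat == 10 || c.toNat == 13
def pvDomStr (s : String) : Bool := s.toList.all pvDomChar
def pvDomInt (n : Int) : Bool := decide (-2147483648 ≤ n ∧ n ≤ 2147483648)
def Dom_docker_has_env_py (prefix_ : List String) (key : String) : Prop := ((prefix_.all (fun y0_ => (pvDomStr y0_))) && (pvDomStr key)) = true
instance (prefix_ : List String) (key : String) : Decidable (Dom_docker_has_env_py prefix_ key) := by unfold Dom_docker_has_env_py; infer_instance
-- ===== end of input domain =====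

-- B replaces A's sequential consume-and-skip index loop by a two-phase positional algorithm:
-- a run-length prefix scan over consecutive -e/--env blocks, then each token is classified
-- independently (value-spec iff the flag run ending just before it has odd length) and tested.


-- ===== PORT A =====
-- _env_key_matches: spec == key or spec.startswith(key + "=")
def envKeyMatches (spec key : String) : Bool :=
  spec == key || PySem.Str.startswith spec (key ++ "=")

-- token.split("=", 1)[1]  (only evaluated when token starts with "--env=", so index 1 exists)
def envEqValue (token : String) : String :=
  (((PySem.Str.splitMax? token "=" 1).getD []).getD 1 "")

-- the while loop of A, with its explicit index i
def dheLoop (prefix_ : List String) (key : String) (i : Nat) : Bool :=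
  if h : i < prefix_.length then
    let token := prefix_[i]
    if (token == "-e" || token == "--env") && decide (i + 1 < prefix_.length) then
      if envKeyMatches (prefix_.getD (i + 1) "") key then true
      else dheLoop prefix_ key (i + 2)
    else if PySem.Str.startswith token "--env=" && envKeyMatches (envEqValue token) key then
      true
    else dheLoop prefix_ key (i + 1)
  else false
termination_by prefix_.length - i

def docker_has_env_py (prefix_ : List String) (key : String) : Bool :=
  dheLoop prefix_ key 0

-- ===== PORT B =====
-- phase 1 of B: runs[i] = length of the maximal block of consecutive "-e"/"--env"
-- tokens ending just before position i (the for loop with append, as a recursion on the list)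
def dheRuns (r : Nat) : List String → List Nat
  | [] => []
  | t :: rest => r :: dheRuns (if t == "-e" || t == "--env" then r + 1 else 0) rest

-- phase 2 of B: classify one token from its run parity (B's local `spec`)
def dheSpec (t : String) (r : Nat) : Option String :=
  if r % 2 ≠ 0 then some t
  else if PySem.Str.startswith t "--env=" then some ((((PySem.Str.splitMax? t "=" 1).getD []).getD 1 ""))
  else none

def docker_has_env_py_alt (prefix_ : List String) (key : String) : Bool :=
  ((prefix_.zip (dheRuns 0 prefix_)).filterMap (fun p => dheSpec p.1 p.2)).any
    (fun s => s == key || PySem.Str.startswith s (key ++ "="))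

-- ===== PRECONDITION & SPEC =====
def Spec_docker_has_env_py (prefix_ : List String) (key : String) (out : Bool) : Prop := out = docker_has_env_py_alt prefix_ key
instance (prefix_ : List String) (key : String) (out : Bool) : Decidable (Spec_docker_has_env_py prefix_ key out) := by unfold Spec_docker_has_env_py; infer_instance

-- ===== CLAIM (what is proved, stated in full; the proofs are below) =====
def Claim_equal_docker_has_env_py : Prop := ∀ (prefix_ : List String) (key : String), Dom_docker_has_env_py prefix_ key → Spec_docker_has_env_py prefix_ key (docker_has_env_py prefix_ key)

-- ===== LEMMAS AND PROOFS =====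

-- common reference state machine: `prev` = "the previous token was an active flag,
-- so the current token is its consumed value"
def bAux (prev : Bool) (key : String) : List String → Bool
  | [] => false
  | t :: rest =>
    ((if prev then envKeyMatches t key
      else if PySem.Str.startswith t "--env=" then envKeyMatches (envEqValue t) key
      else false)
     || bAux ((t == "-e" || t == "--env") && !prev) key rest)

theorem flag_not_enveq (t : String) (hf : (t == "-e" || t == "--env") = true) :
    PySem.Str.startswith t "--env=" = false := by
  rcases Bool.or_eq_true_iff.mp hf with h1 | h1 <;> rw [eq_of_beq h1] <;> decide

-- A's loop from index i equals the state machine on the suffix with prev = false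
theorem dheLoop_eq_bAux (key : String) (prefix_ : List String) (i : Nat) :
    dheLoop prefix_ key i = bAux false key (prefix_.drop i) := by
  by_cases h : i < prefix_.length
  · have hdrop : prefix_.drop i = prefix_[i] :: prefix_.drop (i + 1) :=
      List.drop_eq_getElem_cons h
    rw [dheLoop]
    simp only [h, dif_pos]
    by_cases hflag : (prefix_[i] == "-e" || prefix_[i] == "--env") = true
    · by_cases hnext : i + 1 < prefix_.length
      · have hdrop1 : prefix_.drop (i + 1) = prefix_[i + 1] :: prefix_.drop (i + 2) :=
          List.drop_eq_getElem_cons hnext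
        have hgetD : prefix_.getD (i + 1) "" = prefix_[i + 1] := List.getD_eq_getElem _ _ hnext
        rw [hdrop, hdrop1]
        simp only [hflag, hnext, decide_true, Bool.and_true, if_pos, bAux,
          flag_not_enveq _ hflag, Bool.false_eq_true, if_false, Bool.not_false,
          Bool.and_true, Bool.false_or, hgetD]
        rw [dheLoop_eq_bAux key prefix_ (i + 2)]
        by_cases hm : envKeyMatches prefix_[i + 1] key = true <;>
          simp [hm, Bool.and_false]
      · -- trailing flag with no value: A steps to i+1 (≥ length); machine consumes nothing
        have hend : prefix_.length ≤ i + 1 := Nat.le_of_not_lt hnext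
        rw [hdrop]
        simp only [hnext, decide_false, Bool.and_false, Bool.false_eq_true, if_neg,
          not_false_iff, flag_not_enveq _ hflag, Bool.false_and, bAux]
        rw [dheLoop_eq_bAux key prefix_ (i + 1)]
        simp [List.drop_eq_nil_of_le hend, bAux]
    · have hflag' : (prefix_[i] == "-e" || prefix_[i] == "--env") = false := by
        simpa using hflag
      rw [hdrop]
      simp only [hflag', Bool.false_and, Bool.false_eq_true, if_neg, not_false_iff, bAux,
        Bool.not_false, Bool.and_true]
      rw [dheLoop_eq_bAux key prefix_ (i + 1)]
      by_cases hsw : PySem.Str.startswith prefix_[i] "--env=" = true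
      · by_cases hm : envKeyMatches (envEqValue prefix_[i]) key = true <;>
          simp [envEqValue]
      · simp
  · rw [dheLoop]
    simp [h, List.drop_eq_nil_of_le (Nat.le_of_not_lt h), bAux]
termination_by prefix_.length - i
decreasing_by all_goals omega

-- B's zip/filterMap/any over the run-length list equals the state machine,
-- prev being the parity of the incoming run length
theorem alt_eq_bAux (key : String) (l : List String) (r : Nat) :
    ((l.zip (dheRuns r l)).filterMap (fun p => dheSpec p.1 p.2)).any
      (fun s => s == key || PySem.Str.startswith s (key ++ "=")) =
    bAux (decide (r % 2 ≠ 0)) key l := by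
  induction l generalizing r with
  | nil => simp [dheRuns, bAux]
  | cons t rest ih =>
    rw [dheRuns, List.zip_cons_cons, List.filterMap_cons]
    by_cases hodd : r % 2 ≠ 0
    · have h1 : dheSpec t r = some t := by simp [dheSpec, hodd]
      have hpar : decide ((if (t == "-e" || t == "--env") = true then r + 1 else 0) % 2 ≠ 0)
          = false := by
        split <;> simp <;> omega
      have h2 : r % 2 = 1 := by omega
      rw [h1]
      simp only [List.any_cons, ih, hpar]
      simp [bAux, h2, envKeyMatches]
    · have hp : decide (r % 2 ≠ 0) = false := by simp [hodd]
      have hr0 : r % 2 = 0 := by omega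
      have hpar : decide ((if (t == "-e" || t == "--env") = true then r + 1 else 0) % 2 ≠ 0)
          = ((t == "-e" || t == "--env") && !decide (r % 2 ≠ 0)) := by
        split <;> rename_i hfl <;> simp [hfl, hr0] <;> omega
      have h2 : ¬ r % 2 = 1 := by omega
      by_cases hsw : PySem.Str.startswith t "--env=" = true
      · have hsw' : PySem.Chars.startswith t.toList ['-', '-', 'e', 'n', 'v', '='] = true := by
          simpa using hsw
        have h1 : dheSpec t r = some (envEqValue t) := by
          simp [dheSpec, hodd, hsw', envEqValue]
        rw [h1]
        simp only [List.any_cons, ih, hpar]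
        simp [bAux, h2, hsw', envKeyMatches, envEqValue]
      · have hsw' : PySem.Chars.startswith t.toList ['-', '-', 'e', 'n', 'v', '='] = false := by
          simpa using Bool.eq_false_iff.mpr hsw
        have h1 : dheSpec t r = none := by
          simp [dheSpec, hodd, hsw']
        rw [h1]
        simp only [ih, hpar]
        simp [bAux, h2, hsw']

-- ===== VERDICT (by name: the statement is the Claim_ definition above) =====
theorem docker_has_env_py_spec : Claim_equal_docker_has_env_py := by
  intro prefix_ key _
  unfold Spec_docker_has_env_py docker_has_env_py docker_has_env_py_alt
  rw [alt_eq_bAux]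
  simpa using dheLoop_eq_bAux key prefix_ 0
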